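-- pv_equiv track=rewrite | github.com/kllaodong/-ICGNet | IricGAN-master/iricgan/Decoder/ops.py | featuremap_list
-- ===== SOURCE A (Python) =====
-- def featuremap_list(img_size) :
--     start_feature_map = 512
--     feature_map = start_feature_map
--     x = []
--     fix_num = 0
--     while True :
--         if img_size < 4 :
--             break
--         else :
--             x.append(feature_map)
--             img_size = img_size // 2
--             if fix_num > 2 :
--                 feature_map = feature_map // 2
--             fix_num += 1
--     return x
-- ===== SOURCE B (Python) =====
-- def featuremap_list(img_size):
--     # closed form: no halving loop at all. The number of levels comes directly
--     # from img_size.bit_length(), and the list is assembled as a replicated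
--     # [512] head concatenated with a bit-shift geometric tail.
--     if img_size < 4:
--         return []
--     L = img_size.bit_length() - 2
--     return [512] * min(L, 4) + [512 >> k for k in range(1, L - 3)]
-- ===== Notes on version B (the rewrite author's own statement) =====
-- stated objective: alternative
-- what changed: Replaces A's halving loop entirely with a closed form: the level count comes from img_size.bit_length() - 2 (no loop over img_size), and the list is assembled as a replicated [512] head concatenated with a bit-shift geometric tail.
import Mathlib
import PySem

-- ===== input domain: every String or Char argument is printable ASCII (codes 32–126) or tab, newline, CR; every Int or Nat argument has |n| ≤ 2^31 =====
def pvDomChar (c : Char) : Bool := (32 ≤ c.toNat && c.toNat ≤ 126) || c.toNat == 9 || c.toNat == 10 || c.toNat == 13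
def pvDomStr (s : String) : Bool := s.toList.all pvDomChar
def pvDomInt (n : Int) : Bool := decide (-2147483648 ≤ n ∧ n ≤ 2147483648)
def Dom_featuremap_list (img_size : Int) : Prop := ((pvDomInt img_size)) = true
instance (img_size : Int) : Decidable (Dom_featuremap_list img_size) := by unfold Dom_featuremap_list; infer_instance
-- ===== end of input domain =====

-- B replaces A's halving loop with a closed form (bit_length for the level count,
-- replicated head ++ shift tail for the list); same values, no loop over img_size.

-- ===== PORT A =====
-- A's while-loop: state (img_size, feature_map, fix_num), appending feature_map each turn.
def featuremapLoopA (img_size feature_map fix_num : Int) : List Int :=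
  if img_size < 4 then []
  else
    feature_map ::
      featuremapLoopA (PySem.Int.floordiv img_size 2)
        (if fix_num > 2 then PySem.Int.floordiv feature_map 2 else feature_map)
        (fix_num + 1)
termination_by img_size.toNat
decreasing_by
  have h2 : PySem.Int.floordiv img_size 2 = img_size / 2 :=
    PySem.Int.floordiv_eq_ediv_of_pos (by norm_num)
  rw [h2]; omega

def featuremap_list (img_size : Int) : List Int :=
  featuremapLoopA img_size 512 0

-- ===== PORT B =====
-- Source B: if img_size < 4: []; L = img_size.bit_length() - 2;
--       [512]*min(L,4) + [512 >> k for k in range(1, L-3)].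
-- Python's n.bit_length() for n ≥ 4 is Nat.log2 n + 1 (exact on positive ints);
-- 512 >> k for k ≥ 0 is exact integer division 512 / 2^k.
def featuremap_list_alt (img_size : Int) : List Int :=
  if img_size < 4 then []
  else
    let L : Int := ((img_size.toNat.log2 + 1 : Nat) : Int) - 2
    List.replicate (min L 4).toNat 512 ++
      (PySem.List.pyRange 1 (L - 3) 1).map (fun k => (512 : Int) / 2 ^ k.toNat)

-- ===== PRECONDITION & SPEC =====
def Spec_featuremap_list (img_size : Int) (out : List Int) : Prop := out = featuremap_list_alt img_size
instance (img_size : Int) (out : List Int) : Decidable (Spec_featuremap_list img_size out) := by unfold Spec_featuremap_list; infer_instance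

-- ===== CLAIM =====
def Claim_equal_featuremap_list : Prop := ∀ (img_size : Int), Dom_featuremap_list img_size → Spec_featuremap_list img_size (featuremap_list img_size)

-- ===== LEMMAS AND PROOFS =====

-- the feature-map value emitted at step k (k = fix_num at that step)
def fmAt (k : Int) : Int := PySem.Int.floordiv 512 (2 ^ (max 0 (k - 3)).toNat)

-- the level count, phrased as A's loop counts it
def featuremapCount (n : Int) : Int :=
  if n < 4 then 0 else featuremapCount (PySem.Int.floordiv n 2) + 1
termination_by n.toNat
decreasing_by
  have h2 : PySem.Int.floordiv n 2 = n / 2 :=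
    PySem.Int.floordiv_eq_ediv_of_pos (by norm_num)
  rw [h2]; omega

lemma fmAt_step (k : Int) (hk : 0 ≤ k) :
    fmAt (k + 1) = if k > 2 then PySem.Int.floordiv (fmAt k) 2 else fmAt k := by
  unfold fmAt
  by_cases h : k > 2
  · simp only [h, if_pos]
    have h1 : (max 0 (k + 1 - 3)).toNat = (max 0 (k - 3)).toNat + 1 := by omega
    rw [h1,
        PySem.Int.floordiv_eq_ediv_of_pos (b := (2:Int) ^ ((max 0 (k - 3)).toNat + 1)) (by positivity),
        PySem.Int.floordiv_eq_ediv_of_pos (b := (2:Int)) (by norm_num),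
        PySem.Int.floordiv_eq_ediv_of_pos (b := (2:Int) ^ (max 0 (k - 3)).toNat) (by positivity),
        pow_succ, Int.ediv_ediv_of_nonneg (by positivity)]
  · simp only [h, ite_false]
    have h1 : (max 0 (k + 1 - 3)).toNat = (max 0 (k - 3)).toNat := by omega
    rw [h1]

lemma floordiv_two_toNat_lt (n : Int) (h : ¬ n < 4) :
    (PySem.Int.floordiv n 2).toNat < n.toNat := by
  rw [PySem.Int.floordiv_eq_ediv_of_pos (by norm_num)]; omega

lemma count_eq (n : Int) :
    featuremapCount n = if n < 4 then 0 else featuremapCount (PySem.Int.floordiv n 2) + 1 := by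
  conv_lhs => rw [featuremapCount]

lemma count_nonneg (n : Int) : 0 ≤ featuremapCount n := by
  rw [count_eq]
  by_cases h : n < 4
  · simp [h]
  · simp only [h, ite_false]
    have := count_nonneg (PySem.Int.floordiv n 2)
    omega
termination_by n.toNat
decreasing_by exact floordiv_two_toNat_lt n h

lemma loopA_unfold (img fm k : Int) :
    featuremapLoopA img fm k =
      if img < 4 then []
      else fm :: featuremapLoopA (PySem.Int.floordiv img 2)
             (if k > 2 then PySem.Int.floordiv fm 2 else fm) (k + 1) := by
  conv_lhs => rw [featuremapLoopA]

-- A's loop produces the fmAt pattern over a range of length featuremapCount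
lemma loopA_eq (img : Int) (k : Int) (hk : 0 ≤ k) :
    featuremapLoopA img (fmAt k) k =
      (PySem.List.pyRange 0 (featuremapCount img) 1).map (fun i => fmAt (k + i)) := by
  rw [loopA_unfold, count_eq]
  by_cases h : img < 4
  · simp [h, PySem.List.pyRange_one_eq_nil (le_refl (0:Int))]
  · simp only [h, ite_false]
    rw [← fmAt_step k hk, loopA_eq (PySem.Int.floordiv img 2) (k + 1) (by omega)]
    have hc := count_nonneg (PySem.Int.floordiv img 2)
    conv_rhs => rw [PySem.List.pyRange_one_cons (a := (0:Int)) (by omega)]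
    simp only [List.map_cons, add_zero]
    congr 1
    rw [PySem.List.pyRange_one (a := (0:Int) + 1), PySem.List.pyRange_one (a := (0:Int))]
    have hl : (featuremapCount (PySem.Int.floordiv img 2) + 1 - ((0:Int) + 1)).toNat
        = (featuremapCount (PySem.Int.floordiv img 2) - 0).toNat := by omega
    rw [hl]
    simp only [List.map_map]
    apply List.map_congr_left
    intro j _
    simp only [Function.comp]
    congr 1
    ring
termination_by img.toNat
decreasing_by exact floordiv_two_toNat_lt img h

-- the level count is the closed form bit_length - 2
lemma count_closed (n : Int) (h : ¬ n < 4) :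
    featuremapCount n = ((n.toNat.log2 + 1 : Nat) : Int) - 2 := by
  rw [count_eq]
  simp only [h, ite_false]
  by_cases h2 : PySem.Int.floordiv n 2 < 4
  · rw [count_eq, if_pos h2]
    rw [PySem.Int.floordiv_eq_ediv_of_pos (by norm_num)] at h2
    have hn : n.toNat.log2 = 2 := by
      have h4 : 4 ≤ n.toNat := by omega
      have h8 : n.toNat < 8 := by omega
      interval_cases (n.toNat) <;> decide
    omega
  · rw [count_closed (PySem.Int.floordiv n 2) h2]
    rw [PySem.Int.floordiv_eq_ediv_of_pos (by norm_num)] at h2 ⊢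
    have hdiv : (n / 2).toNat = n.toNat / 2 := by omega
    rw [hdiv]
    have hpos : 1 ≤ Nat.log 2 n.toNat := Nat.log_pos (by norm_num) (by omega)
    have hdb : Nat.log 2 (n.toNat / 2) = Nat.log 2 n.toNat - 1 := Nat.log_div_base 2 n.toNat
    rw [Nat.log2_eq_log_two, Nat.log2_eq_log_two] at *
    omega
termination_by n.toNat
decreasing_by exact floordiv_two_toNat_lt n h

-- fmAt over range 0..L is replicate head ++ shift tail
lemma pattern_split (L : Int) (hL : 0 ≤ L) :
    (PySem.List.pyRange 0 L 1).map (fun i => fmAt (0 + i)) =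
      List.replicate (min L 4).toNat 512 ++
        (PySem.List.pyRange 1 (L - 3) 1).map (fun k => (512 : Int) / 2 ^ k.toNat) := by
  by_cases h4 : L ≤ 4
  · -- tail empty, head length L, every entry 512
    rw [PySem.List.pyRange_one_eq_nil (show L - 3 ≤ 1 by omega)]
    simp only [List.map_nil, List.append_nil]
    have hm : (min L 4).toNat = L.toNat := by omega
    rw [hm, PySem.List.pyRange_one]
    have hL' : (L - 0).toNat = L.toNat := by omega
    rw [hL']
    apply List.ext_getElem
    · simp
    · intro i h1 h2
      simp only [List.getElem_map, List.getElem_range, List.getElem_replicate]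
      simp only [List.length_map, List.length_range] at h1
      simp only [fmAt]
      have hmax : (max 0 (0 + (0 + (i:Int)) - 3)).toNat = 0 := by omega
      rw [hmax]
      decide
  · -- split the range at 4
    rw [PySem.List.pyRange_one_append (a := (0:Int)) (m := 4) (b := L) (by omega) (by omega),
        List.map_append]
    have hm : (min L 4).toNat = 4 := by omega
    rw [hm]
    have hhead : (PySem.List.pyRange 0 4 1).map (fun i => fmAt (0 + i))
        = List.replicate 4 (512:Int) := by decide
    rw [hhead]
    congr 1
    rw [PySem.List.pyRange_one (a := (4:Int)), PySem.List.pyRange_one (a := (1:Int))]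
    have hlen : (L - 4).toNat = (L - 3 - 1).toNat := by omega
    rw [hlen]
    simp only [List.map_map]
    apply List.map_congr_left
    intro j hj
    simp only [Function.comp, fmAt]
    have hmax : (max 0 (0 + (4 + (j:Int)) - 3)).toNat = ((1:Int) + (j:Int)).toNat := by omega
    rw [hmax, PySem.Int.floordiv_eq_ediv_of_pos (by positivity)]

-- ===== VERDICT =====
theorem featuremap_list_spec : Claim_equal_featuremap_list := by
  intro img_size _
  unfold Spec_featuremap_list featuremap_list featuremap_list_alt
  have hfm : fmAt 0 = 512 := by decide
  rw [← hfm, loopA_eq img_size 0 le_rfl]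
  by_cases h : img_size < 4
  · rw [count_eq, if_pos h]
    simp [h, PySem.List.pyRange_one_eq_nil (le_refl (0:Int))]
  · simp only [h, ite_false]
    rw [count_closed img_size h]
    have hlog : 2 ≤ img_size.toNat.log2 :=
      (Nat.le_log2 (by omega)).mpr (by norm_num; omega)
    exact pattern_split _ (by omega)
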